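-- pv_equiv track=rewrite | github.com/jorgeandres-220/Tarea-1-BMC | Tarea#1_BMC.py | complementoARN
-- ===== SOURCE A (Python) =====
-- valoresARN = ['A', 'C', 'U', 'G']
--
-- def verificadorARN(cadena):
--     for valor in cadena:
--         if valor not in valoresARN:
--             return False
--     return True
--
-- def complementoARN(cadena):
--     result = ""
--     if(verificadorARN(cadena)):
--         for valor in cadena:
--             if(valor == "A"):
--                 result += "U"
--             elif(valor == "U"):
--                 result += "A"
--             elif(valor == "C"):
--                 result += "G"
--             else:
--                 result += "C"
--     return result
-- ===== SOURCE B (Python) =====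
-- def complementoARN(cadena):
--     # Single pass: validate and build the complement together; bail out with "" on the first invalid char.
--     result = ""
--     for valor in cadena:
--         if valor == "A":
--             result += "U"
--         elif valor == "U":
--             result += "A"
--         elif valor == "C":
--             result += "G"
--         elif valor == "G":
--             result += "C"
--         else:
--             return ""
--     return result
-- ===== Notes on version B (the rewrite author's own statement) =====
-- stated objective: simpler
-- what changed: Fuses A's separate validation scan and complement-building scan (and the verificadorARN helper) into one single-pass loop that bails out with the empty string at the first invalid character.
import Mathlib
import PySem

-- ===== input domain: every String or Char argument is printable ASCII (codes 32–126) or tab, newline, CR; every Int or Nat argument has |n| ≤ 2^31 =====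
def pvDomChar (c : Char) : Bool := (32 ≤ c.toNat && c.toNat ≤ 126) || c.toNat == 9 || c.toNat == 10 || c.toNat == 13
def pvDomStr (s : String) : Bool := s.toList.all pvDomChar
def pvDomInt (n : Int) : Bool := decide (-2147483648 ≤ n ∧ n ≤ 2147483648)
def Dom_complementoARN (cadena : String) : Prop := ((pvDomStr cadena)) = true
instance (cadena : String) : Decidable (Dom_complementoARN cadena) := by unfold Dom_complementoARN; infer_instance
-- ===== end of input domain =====

-- B fuses A's validation scan and complement-building scan into one pass (returning "" at the first invalid char); same return value everywhere.

-- ===== PORT A =====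
def valoresARN : List Char := ['A', 'C', 'U', 'G']

-- loop of verificadorARN: returns False at the first char not in valoresARN
def verificadorARNGo : List Char → Bool
  | [] => true
  | valor :: rest => if valor ∈ valoresARN then verificadorARNGo rest else false

def verificadorARN (cadena : String) : Bool := verificadorARNGo cadena.toList

-- loop of complementoARN: builds result by successive appends
def complementoARNGo : List Char → String → String
  | [], result => result
  | valor :: rest, result =>
      if valor = 'A' then complementoARNGo rest (result ++ "U")
      else if valor = 'U' then complementoARNGo rest (result ++ "A")
      else if valor = 'C' then complementoARNGo rest (result ++ "G")
      else complementoARNGo rest (result ++ "C")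

def complementoARN (cadena : String) : String :=
  if verificadorARN cadena then complementoARNGo cadena.toList "" else ""

-- ===== PORT B =====
-- single fused pass: append the complement, or return "" at the first invalid char
def complementoARNAltGo : List Char → String → String
  | [], result => result
  | valor :: rest, result =>
      if valor = 'A' then complementoARNAltGo rest (result ++ "U")
      else if valor = 'U' then complementoARNAltGo rest (result ++ "A")
      else if valor = 'C' then complementoARNAltGo rest (result ++ "G")
      else if valor = 'G' then complementoARNAltGo rest (result ++ "C")
      else ""

def complementoARN_alt (cadena : String) : String := complementoARNAltGo cadena.toList ""

-- ===== PRECONDITION & SPEC =====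
def Spec_complementoARN (cadena : String) (out : String) : Prop := out = complementoARN_alt cadena
instance (cadena : String) (out : String) : Decidable (Spec_complementoARN cadena out) := by unfold Spec_complementoARN; infer_instance

-- ===== CLAIM (what is proved, stated in full; the proofs are below) =====
def Claim_equal_complementoARN : Prop := ∀ (cadena : String), Dom_complementoARN cadena → Spec_complementoARN cadena (complementoARN cadena)

-- ===== LEMMAS AND PROOFS =====
lemma go_valid (l : List Char) : ∀ acc, verificadorARNGo l = true →
    complementoARNGo l acc = complementoARNAltGo l acc := by
  induction l with
  | nil => intro acc _; rfl
  | cons c rest ih =>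
    intro acc hv
    simp only [verificadorARNGo, valoresARN] at hv
    by_cases hA : c = 'A'
    · simp [complementoARNGo, complementoARNAltGo, hA]
      exact ih _ (by simpa [hA] using hv)
    · by_cases hU : c = 'U'
      · simp [complementoARNGo, complementoARNAltGo, hU]
        exact ih _ (by simpa [hU] using hv)
      · by_cases hC : c = 'C'
        · simp [complementoARNGo, complementoARNAltGo, hC]
          exact ih _ (by simpa [hC] using hv)
        · by_cases hG : c = 'G'
          · simp [complementoARNGo, complementoARNAltGo, hG]
            exact ih _ (by simpa [hG] using hv)
          · simp [hA, hU, hC, hG] at hv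

lemma go_invalid (l : List Char) : ∀ acc, verificadorARNGo l = false →
    complementoARNAltGo l acc = "" := by
  induction l with
  | nil => intro acc h; simp [verificadorARNGo] at h
  | cons c rest ih =>
    intro acc hv
    simp only [verificadorARNGo, valoresARN] at hv
    by_cases hA : c = 'A'
    · simp [complementoARNAltGo, hA]; exact ih _ (by simpa [hA] using hv)
    · by_cases hU : c = 'U'
      · simp [complementoARNAltGo, hU]; exact ih _ (by simpa [hU] using hv)
      · by_cases hC : c = 'C'
        · simp [complementoARNAltGo, hC]; exact ih _ (by simpa [hC] using hv)
        · by_cases hG : c = 'G'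
          · simp [complementoARNAltGo, hG]; exact ih _ (by simpa [hG] using hv)
          · simp [complementoARNAltGo, hA, hU, hC, hG]

-- ===== VERDICT (by name: the statement is the Claim_ definition above) =====
theorem complementoARN_spec : Claim_equal_complementoARN := by
  intro cadena _
  unfold Spec_complementoARN complementoARN complementoARN_alt verificadorARN
  by_cases h : verificadorARNGo cadena.toList = true
  · simp [h, go_valid _ _ h]
  · have h' : verificadorARNGo cadena.toList = false := eq_false_of_ne_true h
    rw [go_invalid _ "" h', if_neg (by simp [h'])]
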